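-- pv_equiv track=rewrite | github.com/SlveO/MultiAgents_System_For_Career_Planning | project/agents/text.py | _stream_parser
-- ===== SOURCE A (Python) =====
-- def _stream_parser(streamer):
--     full_text = ''
--     thinking = ''
--     response = ''
--     in_thinking = True
--     split_tag = '</think>'
--
--     for token in streamer:
--         full_text += token
--         if in_thinking:
--             if split_tag in full_text:
--                 think_end = full_text.find(split_tag)
--                 thinking = full_text[:think_end].replace('<think>', '').strip()
--                 answer_start = full_text[think_end + len(split_tag):]
--                 yield {'type': 'thinking_complete', 'thinking': thinking, 'token': answer_start}
--                 response = answer_start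
--                 in_thinking = False
--             else:
--                 yield {'type': 'thinking', 'token': token}
--         else:
--             response += token
--             yield {'type': 'response', 'token': token}
--
--     if not thinking and split_tag in full_text:
--         parts = full_text.split(split_tag, 1)
--         thinking = parts[0].replace('<think>', '').strip()
--         response = parts[1].strip() if len(parts) > 1 else full_text.strip()
--
--     yield {'type': 'complete', 'thinking': thinking, 'response': response}
-- ===== SOURCE B (Python) =====
-- # B: incremental tail-buffer matching — searches only the last 7 chars plus the new
-- # token for '</think>' instead of rescanning the whole accumulated text (O(n) vs O(n^2)).
-- def _stream_parser(streamer):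
--     tag = '</think>'
--     keep = len(tag) - 1
--     chunks = []        # all text seen while still in the thinking phase
--     tail = ''          # last <= keep chars of ''.join(chunks)
--     thinking = ''
--     resp_parts = None  # None while thinking, else list of response pieces
--     for token in streamer:
--         if resp_parts is None:
--             window = tail + token
--             j = window.find(tag)
--             if j == -1:
--                 yield {'type': 'thinking', 'token': token}
--                 chunks.append(token)
--                 tail = window[-keep:]
--             else:
--                 pre = ''.join(chunks)
--                 idx = len(pre) - len(tail) + j
--                 text = pre + token
--                 thinking = text[:idx].replace('<think>', '').strip()
--                 answer = text[idx + len(tag):]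
--                 yield {'type': 'thinking_complete', 'thinking': thinking, 'token': answer}
--                 resp_parts = [answer]
--         else:
--             resp_parts.append(token)
--             yield {'type': 'response', 'token': token}
--     if resp_parts is None:
--         yield {'type': 'complete', 'thinking': '', 'response': ''}
--     else:
--         response = ''.join(resp_parts)
--         if not thinking:
--             yield {'type': 'complete', 'thinking': '', 'response': response.strip()}
--         else:
--             yield {'type': 'complete', 'thinking': thinking, 'response': response}
-- ===== Notes on version B (the rewrite author's own statement) =====
-- stated objective: faster
-- what changed: Instead of re-scanning the whole accumulated text for '</think>' on every token, B keeps only the last 7 characters as a tail buffer and searches just tail+token, joining the buffered chunks once when the tag is found and accumulating response pieces in a list joined once at the end.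
import Mathlib
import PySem

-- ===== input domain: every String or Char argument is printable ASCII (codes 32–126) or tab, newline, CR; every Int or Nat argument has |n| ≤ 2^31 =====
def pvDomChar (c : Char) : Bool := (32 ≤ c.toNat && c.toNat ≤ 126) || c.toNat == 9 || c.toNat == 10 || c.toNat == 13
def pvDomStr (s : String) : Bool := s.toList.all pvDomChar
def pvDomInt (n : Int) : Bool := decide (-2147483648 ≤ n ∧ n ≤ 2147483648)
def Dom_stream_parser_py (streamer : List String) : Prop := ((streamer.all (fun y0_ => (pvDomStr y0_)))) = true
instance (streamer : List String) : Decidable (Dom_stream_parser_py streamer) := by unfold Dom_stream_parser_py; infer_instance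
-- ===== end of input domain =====

-- ===== PORT A =====
-- B (incremental tail-buffer search) computes the same events as A (full-text rescan); objective: faster (O(n) vs O(n^2) scanning).
-- Both versions are Python generators; the ports return the list of yielded dicts (as assoc lists).

def pvTag : List Char := ['<', '/', 't', 'h', 'i', 'n', 'k', '>']      -- '</think>'
def pvOpen : List Char := ['<', 't', 'h', 'i', 'n', 'k', '>']          -- '<think>'

def pvGoA : List String → List Char → List Char → List Char → Bool → List (List (String × String))
  | [], full, thinking, response, _ =>
      -- after the loop: the fallback recomputation, then the final 'complete' event
      if thinking.isEmpty && PySem.Chars.isIn pvTag full then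
        -- full_text.split(split_tag, 1): the separator '</think>' is nonempty, so split never raises
        let parts := (PySem.Chars.splitMax? full pvTag 1).getD []
        -- parts[0] always exists (split returns at least one piece), so the getD default is never used
        let th := PySem.Chars.strip (PySem.Chars.replace ((PySem.List.pyGet? parts 0).getD []) pvOpen [])
        let resp := if 1 < parts.length then PySem.Chars.strip ((PySem.List.pyGet? parts 1).getD [])
                    else PySem.Chars.strip full
        [[("type", "complete"), ("thinking", String.ofList th), ("response", String.ofList resp)]]
      else
        [[("type", "complete"), ("thinking", String.ofList thinking), ("response", String.ofList response)]]
  | tok :: rest, full, thinking, response, inThinking =>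
      let t := tok.toList
      let full' := full ++ t
      if inThinking then
        if PySem.Chars.isIn pvTag full' then
          let thinkEnd := PySem.Chars.find full' pvTag
          let th := PySem.Chars.strip (PySem.Chars.replace (PySem.Chars.slice full' none (some thinkEnd)) pvOpen [])
          let answerStart := PySem.Chars.slice full' (some (thinkEnd + (pvTag.length : Int))) none
          [("type", "thinking_complete"), ("thinking", String.ofList th), ("token", String.ofList answerStart)]
            :: pvGoA rest full' th answerStart false
        else
          [("type", "thinking"), ("token", tok)] :: pvGoA rest full' thinking response true
      else
        [("type", "response"), ("token", tok)] :: pvGoA rest full' thinking (response ++ t) false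

def stream_parser_py (streamer : List String) : List (List (String × String)) :=
  pvGoA streamer [] [] [] true

-- ===== PORT B =====
-- state: chunks / tail / thinking / respParts (none while still thinking, as Source B's resp_parts = None)
def pvGoB : List String → List (List Char) → List Char → List Char → Option (List (List Char)) → List (List (String × String))
  | [], _, _, thinking, respParts? =>
      match respParts? with
      | none => [[("type", "complete"), ("thinking", ""), ("response", "")]]
      | some parts =>
          let response := PySem.Chars.join [] parts
          if thinking.isEmpty then
            [[("type", "complete"), ("thinking", ""), ("response", String.ofList (PySem.Chars.strip response))]]
          else
            [[("type", "complete"), ("thinking", String.ofList thinking), ("response", String.ofList response)]]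
  | tok :: rest, chunks, tail, thinking, respParts? =>
      match respParts? with
      | none =>
          let t := tok.toList
          let window := tail ++ t
          let j := PySem.Chars.find window pvTag
          if j == -1 then
            -- window[-keep:] with keep = len(tag)-1 = 7 > 0 is exactly drop (length - 7) (Nat subtraction clamps like Python)
            [("type", "thinking"), ("token", tok)]
              :: pvGoB rest (chunks ++ [t]) (window.drop (window.length - (pvTag.length - 1))) thinking none
          else
            let pre := PySem.Chars.join [] chunks
            let idx := ((pre.length : Int) - (tail.length : Int)) + j
            let text := pre ++ t
            let th := PySem.Chars.strip (PySem.Chars.replace (PySem.Chars.slice text none (some idx)) pvOpen [])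
            let answer := PySem.Chars.slice text (some (idx + (pvTag.length : Int))) none
            [("type", "thinking_complete"), ("thinking", String.ofList th), ("token", String.ofList answer)]
              :: pvGoB rest chunks tail th (some [answer])
      | some parts =>
          [("type", "response"), ("token", tok)] :: pvGoB rest chunks tail thinking (some (parts ++ [tok.toList]))

def stream_parser_py_alt (streamer : List String) : List (List (String × String)) :=
  pvGoB streamer [] [] [] none

-- ===== PRECONDITION & SPEC =====
def Spec_stream_parser_py (streamer : List String) (out : List (List (String × String))) : Prop := out = stream_parser_py_alt streamer
instance (streamer : List String) (out : List (List (String × String))) : Decidable (Spec_stream_parser_py streamer out) := by unfold Spec_stream_parser_py; infer_instance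

-- ===== CLAIM (what is proved, stated in full; the proofs are below) =====
def Claim_equal_stream_parser_py : Prop := ∀ (streamer : List String), Dom_stream_parser_py streamer → Spec_stream_parser_py streamer (stream_parser_py streamer)

-- ===== LEMMAS AND PROOFS =====

-- find s sub is the unique first-occurrence position
lemma pvFindEq (s sub : List Char) (j : Nat) (h1 : sub <+: s.drop j)
    (h2 : ∀ i < j, ¬ sub <+: s.drop i) : PySem.Chars.find s sub = (j : Int) := by
  have hin : PySem.Chars.isIn sub s = true := (PySem.Chars.exists_prefix_drop_iff_isIn sub s).mp ⟨j, h1⟩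
  have hnn : 0 ≤ PySem.Chars.find s sub :=
    (PySem.Chars.find_nonneg_iff s sub).mpr ((PySem.Chars.isIn_iff_infix sub s).mp hin)
  obtain ⟨hp, hmin⟩ := PySem.Chars.find_spec hnn
  have h1' : (PySem.Chars.find s sub).toNat = j := by
    rcases Nat.lt_trichotomy (PySem.Chars.find s sub).toNat j with hlt | heq | hgt
    · exact absurd hp (h2 _ hlt)
    · exact heq
    · exact absurd h1 (hmin j hgt)
  omega
-- an occurrence that fits inside the left part of an append is an occurrence in it
lemma pvPrefixAppendLeft (P x r : List Char) (h : P.length ≤ x.length) : (P <+: x ++ r ↔ P <+: x) := by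
  constructor
  · intro hp
    rw [List.prefix_iff_eq_take] at hp ⊢
    rwa [List.take_append_of_le_length h] at hp
  · intro hp
    exact hp.trans (List.prefix_append x r)

-- an occurrence that fits inside the left part of an append is an occurrence in it
lemma pvPrefixDropAppend (P l r : List Char) (j : Nat) (h : j + P.length ≤ l.length) :
    (P <+: (l ++ r).drop j ↔ P <+: l.drop j) := by
  rw [List.drop_append_of_le_length (by omega)]
  exact pvPrefixAppendLeft P (l.drop j) r (by simp; omega)
-- if the tag does not occur in l, every occurrence in l ++ r starts in the last |P|-1 chars of l or later
lemma pvOccLate (P l r : List Char) (hocc : ¬ P <:+: l) (j : Nat)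
    (h : P <+: (l ++ r).drop j) : l.length + 1 - P.length ≤ j := by
  by_contra hlt
  have hfit : j + P.length ≤ l.length := by omega
  have hp : P <+: l.drop j := (pvPrefixDropAppend P l r j hfit).mp h
  exact hocc ((PySem.Chars.isIn_iff_infix P l).mp
    ((PySem.Chars.exists_prefix_drop_iff_isIn P l).mp ⟨j, hp⟩))
-- locality: searching tail ++ r (tail = last 7 chars of l) is the same as searching l ++ r, when l is clean
lemma pvDropCorr (l r : List Char) (i : Nat) :
    (l.drop (l.length - 7) ++ r).drop i = (l ++ r).drop ((l.length - 7) + i) := by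
  rw [← List.drop_drop, List.drop_append_of_le_length (Nat.sub_le _ _)]

-- locality: searching tail ++ r (tail = last 7 chars of l) is the same as searching l ++ r, when l is clean
lemma pvLocalFindNeg (l r : List Char) (hocc : ¬ pvTag <:+: l) :
    (PySem.Chars.find (l.drop (l.length - 7) ++ r) pvTag = -1 ↔ PySem.Chars.find (l ++ r) pvTag = -1) := by
  rw [PySem.Chars.find_eq_neg_one_iff, PySem.Chars.find_eq_neg_one_iff]
  rw [← PySem.Chars.isIn_iff_infix, ← PySem.Chars.isIn_iff_infix,
      ← PySem.Chars.exists_prefix_drop_iff_isIn, ← PySem.Chars.exists_prefix_drop_iff_isIn]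
  constructor
  · intro hne ⟨j, hj⟩
    have hb : l.length + 1 - pvTag.length ≤ j := pvOccLate pvTag l r hocc j hj
    have hb' : l.length - 7 ≤ j := by simp [pvTag] at hb; omega
    exact hne ⟨j - (l.length - 7), by rw [pvDropCorr]; rwa [Nat.add_sub_cancel' hb']⟩
  · intro hne ⟨i, hi⟩
    exact hne ⟨(l.length - 7) + i, by rwa [← pvDropCorr]⟩
lemma pvLocalFindPos (l r : List Char) (hocc : ¬ pvTag <:+: l)
    (h : 0 ≤ PySem.Chars.find (l.drop (l.length - 7) ++ r) pvTag) :
    PySem.Chars.find (l ++ r) pvTag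
      = ((l.length - 7 : Nat) : Int) + PySem.Chars.find (l.drop (l.length - 7) ++ r) pvTag := by
  obtain ⟨hp, hmin⟩ := PySem.Chars.find_spec h
  set j := (PySem.Chars.find (l.drop (l.length - 7) ++ r) pvTag).toNat with hj
  have hcast : PySem.Chars.find (l.drop (l.length - 7) ++ r) pvTag = (j : Int) := by omega
  rw [hcast]
  rw [pvDropCorr] at hp
  have : PySem.Chars.find (l ++ r) pvTag = (((l.length - 7) + j : Nat) : Int) := by
    apply pvFindEq _ _ _ hp
    intro i hi hpre
    rcases Nat.lt_or_ge i (l.length - 7) with hlt | hge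
    · have := pvOccLate pvTag l r hocc i hpre
      simp [pvTag] at this; omega
    · have hi' : i - (l.length - 7) < j := by omega
      refine hmin _ hi' ?_
      rw [pvDropCorr, Nat.add_sub_cancel' hge]
      exact hpre
  rw [this]; push_cast; ring
-- the first occurrence is stable under appending on the right
lemma pvFindAppend (l r : List Char) (h : pvTag <:+: l) :
    PySem.Chars.find (l ++ r) pvTag = PySem.Chars.find l pvTag := by
  have hnn : 0 ≤ PySem.Chars.find l pvTag := (PySem.Chars.find_nonneg_iff l pvTag).mpr h
  obtain ⟨hp, hmin⟩ := PySem.Chars.find_spec hnn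
  set k := (PySem.Chars.find l pvTag).toNat with hk
  have h8 : pvTag.length = 8 := rfl
  have hklen : k + pvTag.length ≤ l.length := by
    have := hp.length_le; simp [pvTag] at this; omega
  have : PySem.Chars.find (l ++ r) pvTag = (k : Int) := by
    apply pvFindEq
    · rw [List.drop_append_of_le_length (by omega)]
      exact hp.trans (List.prefix_append _ _)
    · intro i hi
      rw [pvPrefixDropAppend _ _ _ _ (by omega)]
      exact hmin i hi
  rw [this]; omega
lemma pvJoinNil (parts : List (List Char)) : PySem.Chars.join [] parts = parts.flatten := by
  simp only [PySem.Chars.join, List.intercalate]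
  induction parts with
  | nil => simp
  | cons p rest ih =>
      cases rest with
      | nil => simp [List.intersperse]
      | cons q rest' => simp_all [List.intersperse]
lemma pvSplitGo0 (sep : List Char) (fuel : Nat) (l cur : List Char) (accs : List (List Char)) :
    PySem.Chars.splitOnMax.go sep fuel 0 l cur accs = ((cur.reverse ++ l) :: accs).reverse := by
  cases fuel with
  | zero => simp [PySem.Chars.splitOnMax.go]
  | succ f => cases l with
    | nil => simp [PySem.Chars.splitOnMax.go]
    | cons c rest => simp [PySem.Chars.splitOnMax.go]

lemma pvFindCons (c : Char) (rest sub : List Char) :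
    PySem.Chars.find (c :: rest) sub
      = if sub.isPrefixOf (c :: rest) then 0
        else (if PySem.Chars.find rest sub = -1 then -1 else PySem.Chars.find rest sub + 1) := by
  by_cases hpre : sub.isPrefixOf (c :: rest)
  · rw [if_pos hpre]
    exact pvFindEq _ _ 0 (by simpa using List.isPrefixOf_iff_prefix.mp hpre) (by omega)
  · rw [if_neg hpre]
    by_cases hrest : PySem.Chars.find rest sub = -1
    · rw [if_pos hrest]
      rw [PySem.Chars.find_eq_neg_one_iff] at hrest ⊢
      intro hinf
      rcases (List.infix_cons_iff).mp hinf with hl | hr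
      · exact hpre (List.isPrefixOf_iff_prefix.mpr hl)
      · exact hrest hr
    · rw [if_neg hrest]
      have hnn : 0 ≤ PySem.Chars.find rest sub := by
        have := PySem.Chars.neg_one_le_find rest sub; omega
      obtain ⟨hp, hmin⟩ := PySem.Chars.find_spec hnn
      set k := (PySem.Chars.find rest sub).toNat with hk
      have : PySem.Chars.find (c :: rest) sub = ((k + 1 : Nat) : Int) := by
        apply pvFindEq
        · simpa using hp
        · intro i hi
          cases i with
          | zero => simpa using fun hcon => hpre (List.isPrefixOf_iff_prefix.mpr hcon)
          | succ i' => simpa using hmin i' (by omega)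
      rw [this]; omega
lemma pvSplitGo1 (l : List Char) (fuel : Nat) (cur : List Char) (accs : List (List Char))
    (hf : l.length < fuel) (h : pvTag <:+: l) :
    PySem.Chars.splitOnMax.go pvTag fuel 1 l cur accs
      = accs.reverse ++ [cur.reverse ++ l.take (PySem.Chars.find l pvTag).toNat,
                         l.drop ((PySem.Chars.find l pvTag).toNat + 8)] := by
  induction l generalizing fuel cur accs with
  | nil =>
      exact absurd (List.eq_nil_of_infix_nil h) (by simp [pvTag])
  | cons c rest ih =>
      cases fuel with
      | zero => omega
      | succ f =>
          rw [pvFindCons c rest pvTag]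
          by_cases hpre : pvTag.isPrefixOf (c :: rest)
          · rw [if_pos hpre]
            simp only [PySem.Chars.splitOnMax.go, hpre, if_pos]
            simp only [if_neg (by omega : ¬ (1:Nat) = 0)]
            rw [pvSplitGo0]
            simp [pvTag]
          · rw [if_neg hpre]
            have hrest : pvTag <:+: rest := by
              rcases (List.infix_cons_iff).mp h with hl | hr
              · exact absurd (List.isPrefixOf_iff_prefix.mpr hl) hpre
              · exact hr
            have hrne : PySem.Chars.find rest pvTag ≠ -1 :=
              fun hcon => ((PySem.Chars.find_eq_neg_one_iff rest pvTag).mp hcon) hrest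
            rw [if_neg hrne]
            have hnn : 0 ≤ PySem.Chars.find rest pvTag :=
              (PySem.Chars.find_nonneg_iff rest pvTag).mpr hrest
            simp only [PySem.Chars.splitOnMax.go]
            simp only [if_neg (by omega : ¬ (1:Nat) = 0), hpre]
            rw [ih f (c :: cur) accs (by simpa using hf) hrest]
            have htn : (PySem.Chars.find rest pvTag + 1).toNat = (PySem.Chars.find rest pvTag).toNat + 1 := by omega
            rw [htn]
            simp
lemma pvSplitChar (l : List Char) (h : pvTag <:+: l) :
    PySem.Chars.splitOnMax l pvTag 1
      = [l.take (PySem.Chars.find l pvTag).toNat, l.drop ((PySem.Chars.find l pvTag).toNat + 8)] := by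
  rw [PySem.Chars.splitOnMax, if_neg (by omega)]
  simp only [Int.toNat_one]
  rw [pvSplitGo1 l (l.length + 1) [] [] (by omega) h]
  simp
lemma pvOfNil : String.ofList ([] : List Char) = "" := rfl

-- phase 2: after the tag was found, both sides just accumulate response tokens
lemma pvPhase2 (rest : List String) (full th resp : List Char) (parts chunks : List (List Char))
    (tail : List Char) (i : Nat)
    (hfind : PySem.Chars.find full pvTag = (i : Int))
    (hocc : pvTag <+: full.drop i)
    (hth : th = PySem.Chars.strip (PySem.Chars.replace (full.take i) pvOpen []))
    (hresp : resp = full.drop (i + 8))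
    (hparts : PySem.Chars.join [] parts = resp) :
    pvGoA rest full th resp false = pvGoB rest chunks tail th (some parts) := by
  induction rest generalizing full resp parts with
  | nil =>
      have hilen : i + 8 ≤ full.length := by
        have := hocc.length_le; simp [pvTag] at this; omega
      have hinf : pvTag <:+: full := (PySem.Chars.isIn_iff_infix pvTag full).mp
        ((PySem.Chars.exists_prefix_drop_iff_isIn pvTag full).mp ⟨i, hocc⟩)
      have hisin : PySem.Chars.isIn pvTag full = true := (PySem.Chars.isIn_iff_infix pvTag full).mpr hinf
      simp only [pvGoA, pvGoB, hisin, Bool.and_true]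
      by_cases hemp : th.isEmpty
      · rw [List.isEmpty_iff] at hemp
        simp only [hemp, List.isEmpty_nil, if_pos]
        rw [show PySem.Chars.splitMax? full pvTag 1 = some (PySem.Chars.splitOnMax full pvTag 1) by
              simp [PySem.Chars.splitMax?, pvTag]]
        rw [pvSplitChar full hinf, hfind]
        simp only [Int.toNat_natCast, Option.getD_some]
        rw [show ((PySem.List.pyGet? [full.take i, full.drop (i + 8)] 0).getD []) = full.take i by
              simp [PySem.List.pyGet?, PySem.List.pyIdx?]]
        rw [show ((PySem.List.pyGet? [full.take i, full.drop (i + 8)] 1).getD []) = full.drop (i + 8) by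
              simp [PySem.List.pyGet?, PySem.List.pyIdx?]]
        rw [if_pos (by simp)]
        rw [← hth, hemp, hparts, hresp, pvOfNil]
      · have hemp' : th.isEmpty = false := by simpa using hemp
        simp only [hemp', Bool.false_eq_true, if_false]
        rw [hparts, hresp]
  | cons tok rest ih =>
      have hilen : i + 8 ≤ full.length := by
        have := hocc.length_le; simp [pvTag] at this; omega
      have hinf : pvTag <:+: full := (PySem.Chars.isIn_iff_infix pvTag full).mp
        ((PySem.Chars.exists_prefix_drop_iff_isIn pvTag full).mp ⟨i, hocc⟩)
      simp only [pvGoA, pvGoB, Bool.false_eq_true, if_false]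
      congr 1
      apply ih
      · rw [pvFindAppend full tok.toList hinf]; exact hfind
      · rw [List.drop_append_of_le_length (by omega)]
        exact hocc.trans (List.prefix_append _ _)
      · rw [List.take_append_of_le_length (by omega)]; exact hth
      · rw [List.drop_append_of_le_length (by omega), ← hresp]
      · rw [pvJoinNil] at hparts ⊢
        simp [hparts]

-- phase 1: still thinking; B's tail is the last 7 chars of A's full_text, which is tag-free
lemma pvPhase1 (rest : List String) (full : List Char) (chunks : List (List Char)) (tail : List Char)
    (hchunks : PySem.Chars.join [] chunks = full)
    (htail : tail = full.drop (full.length - 7))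
    (hclean : ¬ pvTag <:+: full) :
    pvGoA rest full [] [] true = pvGoB rest chunks tail [] none := by
  induction rest generalizing full chunks tail with
  | nil =>
      have hisin : PySem.Chars.isIn pvTag full = false := by
        rw [← Bool.not_eq_true, PySem.Chars.isIn_iff_infix]; exact hclean
      simp [pvGoA, pvGoB, hisin]
  | cons tok rest ih =>
      have hble : full.length - 7 ≤ full.length := Nat.sub_le _ _
      have hw : tail ++ tok.toList = (full ++ tok.toList).drop (full.length - 7) := by
        rw [htail, List.drop_append_of_le_length hble]
      by_cases hj : PySem.Chars.find (tail ++ tok.toList) pvTag = -1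
      · have hfull : PySem.Chars.find (full ++ tok.toList) pvTag = -1 := by
          rw [← pvLocalFindNeg full tok.toList hclean, ← htail]; exact hj
        have hisin : PySem.Chars.isIn pvTag (full ++ tok.toList) = false := by
          simp [PySem.Chars.isIn, hfull]
        simp only [pvGoA, pvGoB, hisin, if_pos, Bool.false_eq_true, if_false,
                   hj, beq_self_eq_true]
        congr 1
        apply ih
        · rw [pvJoinNil] at hchunks ⊢
          simp [hchunks]
        · rw [hw, List.drop_drop]
          congr 1
          have h8 : pvTag.length = 8 := rfl
          simp only [List.length_append, List.length_drop]
          omega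
        · rw [← PySem.Chars.find_eq_neg_one_iff]; exact hfull
      · have hjnn : 0 ≤ PySem.Chars.find (tail ++ tok.toList) pvTag := by
          have := PySem.Chars.neg_one_le_find (tail ++ tok.toList) pvTag; omega
        have hfull : PySem.Chars.find (full ++ tok.toList) pvTag
            = ((full.length - 7 : Nat) : Int) + PySem.Chars.find (tail ++ tok.toList) pvTag := by
          rw [htail] at hj hjnn ⊢
          exact pvLocalFindPos full tok.toList hclean hjnn
        have hfnn : 0 ≤ PySem.Chars.find (full ++ tok.toList) pvTag := by
          rw [hfull]; omega
        have hisin : PySem.Chars.isIn pvTag (full ++ tok.toList) = true := by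
          simp [PySem.Chars.isIn]; omega
        have hbeq : (PySem.Chars.find (tail ++ tok.toList) pvTag == -1) = false := by
          simp [hj]
        have htlen : tail.length = full.length - (full.length - 7) := by rw [htail]; simp
        have hidx : (full.length : Int) - (tail.length : Int)
              + PySem.Chars.find (tail ++ tok.toList) pvTag
            = PySem.Chars.find (full ++ tok.toList) pvTag := by
          rw [htlen, hfull]; omega
        simp only [pvGoA, pvGoB, hisin, if_pos, hbeq, Bool.false_eq_true, if_false]
        rw [hchunks, hidx]
        set e := PySem.Chars.find (full ++ tok.toList) pvTag with he
        set i : Nat := e.toNat with hi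
        have hecast : e = (i : Int) := by omega
        have hocc : pvTag <+: (full ++ tok.toList).drop i := by
          have := (PySem.Chars.find_spec hfnn).1
          rwa [← he] at this
        congr 1
        apply pvPhase2 _ _ _ _ _ chunks tail i
        · rw [← he, hecast]
        · exact hocc
        · rw [hecast]
          congr 1
          simp [pysem]
        · rw [hecast]
          have h8 : (pvTag.length : Int) = 8 := rfl
          simp only [PySem.Chars.slice_eq_listSlice]
          rw [PySem.List.slice_from _ (by omega)]
          congr 1
        · rw [pvJoinNil]; simp

-- ===== VERDICT (by name: the statement is the Claim_ definition above) =====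
theorem stream_parser_py_spec : Claim_equal_stream_parser_py := by
  intro streamer _
  unfold Spec_stream_parser_py stream_parser_py stream_parser_py_alt
  exact pvPhase1 streamer [] [] [] rfl rfl (by simp [pvTag])
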